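-- pv_equiv track=rewrite | github.com/hhennessy20/PSYC_684_Project | src/pdsm/pdsm.py | get_phoneme_boundaries
-- ===== SOURCE A (Python) =====
-- def get_phoneme_boundaries(X_ep):
--     """
--     Determine phoneme boundaries from argmax phoneme sequence X_ep.
--     Input:
--         X_ep: [T] sequence of phoneme indices per frame
--     Output:
--         List of tuples (phoneme_label, start_idx, end_idx)
--     """
--     boundaries = []
--     prev_label = int(X_ep[0])
--     start = 0
--
--     for t in range(1, len(X_ep)):
--         if X_ep[t] != prev_label:
--             boundaries.append((prev_label, start, t))
--             prev_label = int(X_ep[t])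
--             start = t
--
--     boundaries.append((prev_label, start, len(X_ep)))  # final segment
--     return boundaries
-- ===== SOURCE B (Python) =====
-- def get_phoneme_boundaries(X_ep):
--     """Run-scanning re-implementation: walk the sequence run by run with two
--     indices instead of per-frame prev_label comparisons."""
--     boundaries = []
--     idx = 0
--     n = len(X_ep)
--     while idx < n:
--         label = int(X_ep[idx])
--         j = idx + 1
--         while j < n and X_ep[j] == label:
--             j += 1
--         boundaries.append((label, idx, j))
--         idx = j
--     return boundaries
-- ===== Notes on version B (the rewrite author's own statement) =====
-- stated objective: alternative
-- what changed: Replaces the per-frame prev_label/start state machine by a run-scanning loop: an outer loop per run whose inner scan finds the run's end, emitting one (label, start, end) triple per run.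
import Mathlib
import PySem

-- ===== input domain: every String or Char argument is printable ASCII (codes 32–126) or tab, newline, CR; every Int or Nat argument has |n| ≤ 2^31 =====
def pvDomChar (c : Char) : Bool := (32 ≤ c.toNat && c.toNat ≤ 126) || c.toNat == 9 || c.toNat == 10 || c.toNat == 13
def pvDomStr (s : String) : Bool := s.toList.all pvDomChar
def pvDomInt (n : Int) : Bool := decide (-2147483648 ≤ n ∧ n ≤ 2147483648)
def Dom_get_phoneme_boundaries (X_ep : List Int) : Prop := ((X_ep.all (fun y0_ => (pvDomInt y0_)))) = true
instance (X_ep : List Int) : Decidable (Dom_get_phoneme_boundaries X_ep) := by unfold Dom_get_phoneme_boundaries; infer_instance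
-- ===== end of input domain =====

-- B replaces A's per-frame prev_label/start state machine by a run-scanning loop
-- (one outer step per run, an inner scan finding the run's end); equal return values
-- on all non-empty inputs.

-- ===== PORT A =====
def get_phoneme_boundaries (X_ep : List Int) : List (Int × Int × Int) :=
  -- boundaries = []; prev_label = first element; start = 0  (raises on empty input: excluded by Pre_)
  let st := (PySem.List.pyRange 1 (X_ep.length : Int) 1).foldl
    (fun st t =>
      if PySem.List.pyGetD X_ep t 0 ≠ st.2.1 then
        (st.1 ++ [(st.2.1, st.2.2, t)], PySem.List.pyGetD X_ep t 0, t)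
      else st)
    (([] : List (Int × Int × Int)), PySem.List.pyGetD X_ep 0 0, (0 : Int))
  st.1 ++ [(st.2.1, st.2.2, (X_ep.length : Int))]

-- ===== PORT B =====
-- the nested while loops fused into one structural recursion over the remaining frames:
-- (label, start, j) is the current run; `y == label` is the inner scan's step, the else
-- branch is the outer loop's emit-and-restart; exactly Source B's comparisons and emissions.
def bRuns : Int → Int → Int → List Int → List (Int × Int × Int)
  | label, start, j, [] => [(label, start, j)]
  | label, start, j, y :: ys =>
    if y == label then bRuns label start (j + 1) ys
    else (label, start, j) :: bRuns y j (j + 1) ys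

def get_phoneme_boundaries_alt (X_ep : List Int) : List (Int × Int × Int) :=
  match X_ep with
  | [] => []
  | x :: xs => bRuns x 0 1 xs

-- ===== PRECONDITION & SPEC =====
-- A reads the first element unconditionally, so it raises IndexError on the empty list; Pre_ excludes exactly that.
def Pre_get_phoneme_boundaries (X_ep : List Int) : Prop := X_ep ≠ []
instance (X_ep : List Int) : Decidable (Pre_get_phoneme_boundaries X_ep) := by unfold Pre_get_phoneme_boundaries; infer_instance
def pvWitness_get_phoneme_boundaries : List Int := [1, 1, 2]

def Spec_get_phoneme_boundaries (X_ep : List Int) (out : List (Int × Int × Int)) : Prop := out = get_phoneme_boundaries_alt X_ep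
instance (X_ep : List Int) (out : List (Int × Int × Int)) : Decidable (Spec_get_phoneme_boundaries X_ep out) := by unfold Spec_get_phoneme_boundaries; infer_instance

-- ===== CLAIM (what is proved, stated in full; the proofs are below) =====
def Claim_equal_get_phoneme_boundaries : Prop := ∀ (X_ep : List Int), Dom_get_phoneme_boundaries X_ep → Pre_get_phoneme_boundaries X_ep → Spec_get_phoneme_boundaries X_ep (get_phoneme_boundaries X_ep)

-- ===== LEMMAS AND PROOFS =====

-- A's index fold over pyRange s..len, finalized, equals B's run recursion on the dropped suffix
lemma foldA_eq_bRuns (l : List Int) :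
    ∀ (k s : Nat), s + k = l.length → ∀ (bs : List (Int × Int × Int)) (prev start : Int),
    (let st := (PySem.List.pyRange (s : Int) (l.length : Int) 1).foldl
        (fun st t =>
          if PySem.List.pyGetD l t 0 ≠ st.2.1 then
            (st.1 ++ [(st.2.1, st.2.2, t)], PySem.List.pyGetD l t 0, t)
          else st) (bs, prev, start);
      st.1 ++ [(st.2.1, st.2.2, (l.length : Int))])
    = bs ++ bRuns prev start (s : Int) (l.drop s) := by
  intro k
  induction k with
  | zero =>
    intro s hs bs prev start
    have h1 : (s : Int) = (l.length : Int) := by omega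
    have h2 : l.drop s = [] := by
      apply List.drop_eq_nil_of_le; omega
    simp [h1, h2, bRuns, PySem.List.pyRange]
  | succ k ih =>
    intro s hs bs prev start
    have hlt : s < l.length := by omega
    have hrange : PySem.List.pyRange (s : Int) (l.length : Int) 1
        = (s : Int) :: PySem.List.pyRange ((s : Int) + 1) (l.length : Int) 1 :=
      PySem.List.pyRange_one_cons (by exact_mod_cast hlt)
    have hget : PySem.List.pyGetD l (s : Int) 0 = l[s] := by
      rw [PySem.List.pyGetD_natCast, List.getD_eq_getElem?_getD,
          List.getElem?_eq_getElem hlt, Option.getD_some]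
    have hdrop : l.drop s = l[s] :: l.drop (s + 1) := List.drop_eq_getElem_cons hlt
    have hcast : ((s : Int) + 1) = ((s + 1 : Nat) : Int) := by push_cast; ring
    simp only [hrange, List.foldl_cons, hget]
    by_cases hne : l[s] = prev
    · simp only [hne, ne_eq, not_true_eq_false, ite_false]
      rw [hcast, ih (s + 1) (by omega) bs prev start]
      rw [hdrop, bRuns]
      simp only [hne, beq_self_eq_true, ite_true, ← hcast]
    · simp only [ne_eq, hne, not_false_iff, ite_true]
      rw [hcast, ih (s + 1) (by omega) (bs ++ [(prev, start, (s : Int))]) l[s] (s : Int)]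
      rw [hdrop, bRuns]
      have hb : (l[s] == prev) = false := by simp [hne]
      simp [hb, ← hcast]

theorem get_phoneme_boundaries_spec : Claim_equal_get_phoneme_boundaries := by
  intro X_ep _ hpre
  unfold Spec_get_phoneme_boundaries
  match X_ep, hpre with
  | x :: xs, _ =>
    have h0 : PySem.List.pyGetD (x :: xs) 0 0 = x := by
      simp [PySem.List.pyGetD]
    have h := foldA_eq_bRuns (x :: xs) xs.length 1 (by simp [Nat.add_comm]) [] x 0
    unfold get_phoneme_boundaries
    simp only [h0]
    rw [show ((1 : Nat) : Int) = 1 by norm_num] at h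
    rw [h]
    simp [get_phoneme_boundaries_alt]
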